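-- pv_equiv track=rewrite | github.com/aporb/LocalTranscribe | localtranscribe/core/segment_processing.py | _count_speaker_switches
-- ===== SOURCE A (Python) =====
-- from typing import List, Dict, Any, Optional
--
-- def _count_speaker_switches(segments: List[Dict[str, Any]]) -> int:
--     """Count the number of speaker switches in segments.
--
--     Args:
--         segments: List of segment dicts
--
--     Returns:
--         Number of speaker switches
--     """
--     if len(segments) < 2:
--         return 0
--
--     switches = 0
--     for i in range(1, len(segments)):
--         if segments[i]['speaker'] != segments[i - 1]['speaker']:
--             switches += 1
--
--     return switches
-- ===== SOURCE B (Python) =====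
-- def _count_speaker_switches(segments):
--     if len(segments) < 2:
--         return 0
--
--     def rec(lo, hi):
--         # number of speaker switches inside segments[lo:hi]
--         if hi - lo < 2:
--             return 0
--         mid = (lo + hi) // 2
--         boundary = 1 if segments[mid]['speaker'] != segments[mid - 1]['speaker'] else 0
--         return rec(lo, mid) + boundary + rec(mid, hi)
--
--     return rec(0, len(segments))
-- ===== Notes on version B (the rewrite author's own statement) =====
-- stated objective: alternative
-- what changed: Replaces A's single linear index loop over adjacent pairs by a divide-and-conquer recursion: split the interval at its midpoint, count switches in each half recursively and add one boundary comparison at the split; correct because switch counts are additive over a split.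
import Mathlib
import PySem

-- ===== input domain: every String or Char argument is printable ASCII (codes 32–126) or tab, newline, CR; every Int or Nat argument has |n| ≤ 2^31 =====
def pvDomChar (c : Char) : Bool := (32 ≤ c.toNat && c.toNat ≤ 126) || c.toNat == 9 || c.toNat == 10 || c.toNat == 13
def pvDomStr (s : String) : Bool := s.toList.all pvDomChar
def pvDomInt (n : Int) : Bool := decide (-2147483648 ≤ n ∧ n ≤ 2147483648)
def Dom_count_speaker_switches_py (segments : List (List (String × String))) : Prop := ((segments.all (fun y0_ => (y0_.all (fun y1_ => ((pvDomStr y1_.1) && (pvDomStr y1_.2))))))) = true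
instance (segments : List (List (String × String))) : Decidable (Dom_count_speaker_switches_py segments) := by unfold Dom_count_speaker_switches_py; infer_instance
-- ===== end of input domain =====

-- B replaces A's linear adjacent-pair index loop by a divide-and-conquer recursion
-- (switch counts are additive over a midpoint split); equal to A wherever A returns (Pre_ excludes KeyError).

-- ===== PORT A =====
-- segments[i]['speaker'] : first-match lookup in the association list; "" only reached outside Pre_ (KeyError)
def pvSpk (d : List (String × String)) : String :=
  ((PySem.Dict.mk d).get? "speaker").getD ""

def count_speaker_switches_py (segments : List (List (String × String))) : Int :=
  if segments.length < 2 then 0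
  else
    (PySem.List.pyRange 1 segments.length 1).foldl
      (fun switches i =>
        if pvSpk (PySem.List.pyGetD segments i []) ≠ pvSpk (PySem.List.pyGetD segments (i - 1) []) then
          switches + 1
        else switches) 0

-- ===== PORT B =====
-- rec(lo, hi) from Source B: split at mid = (lo+hi)//2, recurse on both halves, add the boundary comparison
def pvRec (segments : List (List (String × String))) (lo hi : Int) : Int :=
  if hge : hi - lo < 2 then 0
  else
    -- mid = (lo + hi) // 2 from Source B, written out at each use; boundary is the inlined comparison
    pvRec segments lo (PySem.Int.floordiv (lo + hi) 2)
    + (if pvSpk (PySem.List.pyGetD segments (PySem.Int.floordiv (lo + hi) 2) [])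
          ≠ pvSpk (PySem.List.pyGetD segments (PySem.Int.floordiv (lo + hi) 2 - 1) []) then 1 else 0)
    + pvRec segments (PySem.Int.floordiv (lo + hi) 2) hi
termination_by (hi - lo).toNat
decreasing_by
  all_goals
    have h2 : PySem.Int.floordiv (lo + hi) 2 = (lo + hi) / 2 :=
      PySem.Int.floordiv_eq_ediv_of_pos (by omega)
    simp only [h2]
    omega

def count_speaker_switches_py_alt (segments : List (List (String × String))) : Int :=
  if segments.length < 2 then 0
  else pvRec segments 0 segments.length

-- ===== PRECONDITION & SPEC =====
-- Pre_ excludes exactly the inputs where Python A raises KeyError: length ≥ 2 with some segment lacking a 'speaker' key.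
def Pre_count_speaker_switches_py (segments : List (List (String × String))) : Prop :=
  segments.length < 2 ∨ ∀ d ∈ segments, ((PySem.Dict.mk d).contains "speaker") = true

instance (segments : List (List (String × String))) : Decidable (Pre_count_speaker_switches_py segments) := by
  unfold Pre_count_speaker_switches_py; infer_instance

def pvWitness_count_speaker_switches_py : (List (List (String × String))) :=
  [[("speaker", "A")], [("speaker", "B")], [("speaker", "B")]]

def Spec_count_speaker_switches_py (segments : List (List (String × String))) (out : Int) : Prop := out = count_speaker_switches_py_alt segments
instance (segments : List (List (String × String))) (out : Int) : Decidable (Spec_count_speaker_switches_py segments out) := by unfold Spec_count_speaker_switches_py; infer_instance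

-- ===== CLAIM (what is proved, stated in full; the proofs are below) =====
def Claim_equal_count_speaker_switches_py : Prop := ∀ (segments : List (List (String × String))), Dom_count_speaker_switches_py segments → Pre_count_speaker_switches_py segments → Spec_count_speaker_switches_py segments (count_speaker_switches_py segments)

-- ===== LEMMAS AND PROOFS =====

-- A's loop step and the sum it accumulates over an index interval
def pvStep (segments : List (List (String × String))) (sw i : Int) : Int :=
  if pvSpk (PySem.List.pyGetD segments i []) ≠ pvSpk (PySem.List.pyGetD segments (i - 1) []) then sw + 1
  else sw

def pvCount (segments : List (List (String × String))) (a b : Int) : Int :=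
  (PySem.List.pyRange a b 1).foldl (pvStep segments) 0

lemma pvStep_shift (segments : List (List (String × String))) (acc : Int) (l : List Int) :
    ∀ a : Int, l.foldl (pvStep segments) (a + acc) = a + l.foldl (pvStep segments) acc := by
  induction l generalizing acc with
  | nil => intro a; rfl
  | cons x r ih =>
    intro a
    simp only [List.foldl_cons]
    have : pvStep segments (a + acc) x = a + pvStep segments acc x := by
      unfold pvStep; split_ifs <;> ring
    rw [this, ih]

lemma pvCount_split (segments : List (List (String × String))) (a m b : Int)
    (h1 : a ≤ m) (h2 : m ≤ b) :
    pvCount segments a b = pvCount segments a m + pvCount segments m b := by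
  unfold pvCount
  rw [PySem.List.pyRange_one_append a m b h1 h2, List.foldl_append]
  rw [show (PySem.List.pyRange a m 1).foldl (pvStep segments) 0
        = (PySem.List.pyRange a m 1).foldl (pvStep segments) 0 + 0 by ring,
      ← pvStep_shift]
  ring_nf

lemma pvRec_eq_count (segments : List (List (String × String))) :
    ∀ lo hi : Int, pvRec segments lo hi = pvCount segments (lo + 1) hi := by
  intro lo hi
  induction hfuel : (hi - lo).toNat using Nat.strong_induction_on generalizing lo hi with
  | _ n ih =>
  rw [pvRec]
  by_cases h : hi - lo < 2
  · rw [dif_pos h]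
    unfold pvCount
    rw [PySem.List.pyRange_one_eq_nil (by omega)]
    rfl
  · rw [dif_neg h]
    set mid := PySem.Int.floordiv (lo + hi) 2 with hmid
    have hb : 2 * mid ≤ lo + hi ∧ lo + hi < 2 * (mid + 1) := by
      simp only [hmid, PySem.Int.floordiv_eq_ediv_of_pos (show (0:Int) < 2 by omega)]
      omega
    have e1 := ih ((mid - lo).toNat) (by omega) lo mid rfl
    have e2 := ih ((hi - mid).toNat) (by omega) mid hi rfl
    rw [e1, e2]
    rw [pvCount_split segments (lo + 1) mid hi (by omega) (by omega),
        pvCount_split segments mid (mid + 1) hi (by omega) (by omega)]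
    have hsing : pvCount segments mid (mid + 1) = pvStep segments 0 mid := by
      unfold pvCount
      rw [PySem.List.pyRange_one_singleton]
      rfl
    rw [hsing]
    unfold pvStep
    split_ifs <;> ring

-- ===== VERDICT (by name: the statement is the Claim_ definition above) =====
theorem count_speaker_switches_py_spec : Claim_equal_count_speaker_switches_py := by
  intro segments _ _
  unfold Spec_count_speaker_switches_py count_speaker_switches_py count_speaker_switches_py_alt
  by_cases h : segments.length < 2
  · simp [h]
  · rw [if_neg h, if_neg h, pvRec_eq_count]
    unfold pvCount pvStep
    norm_num
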